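-- pv_equiv track=rewrite | github.com/junyang10734/leetcode-python | Amazon/Highest_Maxium_Profits.py | supplierInventory
-- ===== SOURCE A (Python) =====
-- import collections
--
-- def supplierInventory(numSupplier, inventory, order):
--     cnt = collections.Counter(inventory)
--     curr = max(cnt)
--     profit = 0
--
--     while order > 0 and curr > 0:
--         freq = cnt[curr]
--         if order >= freq:
--             order -= freq
--             profit += curr * freq
--         elif order < freq:
--             profit += curr * order
--             break
--
--         curr -= 1
--         cnt[curr] += freq
--
--     return profit
-- ===== SOURCE B (Python) =====
-- import collections
--
-- def supplierInventory(numSupplier, inventory, order):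
--     # Sort distinct positive values descending; jump whole level ranges
--     # with arithmetic-series sums instead of decrementing one value at a time.
--     if order <= 0:
--         return 0
--     cnt = collections.Counter(v for v in inventory if v > 0)
--     vals = sorted(cnt, reverse=True)
--     profit = 0
--     pile = 0
--     for i, hi in enumerate(vals):
--         lo = vals[i + 1] if i + 1 < len(vals) else 0
--         pile += cnt[hi]
--         block = pile * (hi - lo)
--         if order >= block:
--             profit += pile * (hi + lo + 1) * (hi - lo) // 2
--             order -= block
--         else:
--             k = order // pile
--             r = order % pile
--             profit += pile * (2 * hi - k + 1) * k // 2 + r * (hi - k)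
--             return profit
--     return profit
-- ===== Notes on version B (the rewrite author's own statement) =====
-- stated objective: alternative
-- what changed: Instead of cascading a Counter down one value-level at a time (O(maxValue) iterations), B sorts the distinct positive values descending and jumps over each constant-supply range of levels with an arithmetic-series closed form (intended as faster, O(n log n) vs O(n+maxValue); a timing run measured only ~1.4x on its inputs).
import Mathlib
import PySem

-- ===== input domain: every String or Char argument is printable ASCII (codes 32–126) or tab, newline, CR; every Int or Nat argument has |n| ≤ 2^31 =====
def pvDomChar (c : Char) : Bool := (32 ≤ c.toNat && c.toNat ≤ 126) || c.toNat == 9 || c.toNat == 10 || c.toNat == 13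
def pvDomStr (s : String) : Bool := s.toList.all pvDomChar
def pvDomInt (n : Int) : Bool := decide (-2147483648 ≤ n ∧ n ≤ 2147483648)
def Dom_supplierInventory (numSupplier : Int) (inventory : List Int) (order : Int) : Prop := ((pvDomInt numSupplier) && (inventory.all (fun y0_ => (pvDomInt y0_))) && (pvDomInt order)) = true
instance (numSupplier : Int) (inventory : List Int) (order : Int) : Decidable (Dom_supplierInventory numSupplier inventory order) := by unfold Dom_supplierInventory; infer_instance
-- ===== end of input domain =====

-- B replaces A's one-value-level-at-a-time cascading Counter loop by a descending
-- sweep over the distinct positive values that jumps whole ranges of levels with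
-- arithmetic-series closed forms (objective: alternative; O(n log n) vs O(n+maxValue) iterations, not confirmed faster in a timing run).

-- ===== PORT A =====
-- the while loop: state (cnt, curr, order, profit); terminates because curr decreases
def pvALoop (cnt : PySem.Dict Int Int) (curr order profit : Int) : Int :=
  if h : 0 < order ∧ 0 < curr then
    let freq := cnt.getD curr 0
    if freq ≤ order then
      pvALoop (cnt.modify (curr - 1) 0 (· + freq)) (curr - 1) (order - freq) (profit + curr * freq)
    else
      profit + curr * order
  else profit
termination_by curr.toNat
decreasing_by omega

def supplierInventory (numSupplier : Int) (inventory : List Int) (order : Int) : Int :=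
  let cnt := PySem.Dict.counter inventory
  match PySem.List.max? cnt.keys (fun x => x) with
  | none => 0   -- Python's max() raises ValueError here (empty inventory); excluded by Pre_
  | some curr => pvALoop cnt curr order 0

-- ===== PORT B =====
-- loop over the distinct positive values sorted descending, with lookahead lo
def pvBLoop (cnt : PySem.Dict Int Int) (vals : List Int) (pile profit order : Int) : Int :=
  match vals with
  | [] => profit
  | hi :: rest =>
    let lo : Int := match rest with | [] => 0 | l :: _ => l
    let pile' := pile + cnt.getD hi 0
    let block := pile' * (hi - lo)
    if block ≤ order then
      pvBLoop cnt rest pile' (profit + PySem.Int.floordiv (pile' * (hi + lo + 1) * (hi - lo)) 2) (order - block)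
    else
      let k := PySem.Int.floordiv order pile'
      let r := PySem.Int.mod order pile'
      profit + PySem.Int.floordiv (pile' * (2 * hi - k + 1) * k) 2 + r * (hi - k)

def supplierInventory_alt (numSupplier : Int) (inventory : List Int) (order : Int) : Int :=
  if order ≤ 0 then 0
  else
    let cnt := PySem.Dict.counter (inventory.filter (fun v => decide (0 < v)))
    let vals := PySem.List.sorted cnt.keys (fun x => x) true
    pvBLoop cnt vals 0 0 order

-- ===== PRECONDITION & SPEC =====
-- Pre_ excludes only the empty inventory, on which A's max() raises ValueError.
def Pre_supplierInventory (numSupplier : Int) (inventory : List Int) (order : Int) : Prop :=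
  inventory ≠ []
instance (numSupplier : Int) (inventory : List Int) (order : Int) : Decidable (Pre_supplierInventory numSupplier inventory order) := by unfold Pre_supplierInventory; infer_instance

def pvWitness_supplierInventory : Int × List Int × Int := (1, ([3, 1, 3], 4))

def Spec_supplierInventory (numSupplier : Int) (inventory : List Int) (order : Int) (out : Int) : Prop := out = supplierInventory_alt numSupplier inventory order
instance (numSupplier : Int) (inventory : List Int) (order : Int) (out : Int) : Decidable (Spec_supplierInventory numSupplier inventory order out) := by unfold Spec_supplierInventory; infer_instance

-- ===== CLAIM (what is proved, stated in full; the proofs are below) =====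
def Claim_equal_supplierInventory : Prop := ∀ (numSupplier : Int) (inventory : List Int) (order : Int), Dom_supplierInventory numSupplier inventory order → Pre_supplierInventory numSupplier inventory order → Spec_supplierInventory numSupplier inventory order (supplierInventory numSupplier inventory order)

-- ===== LEMMAS AND PROOFS =====

-- number of inventory items with value ≥ v
def cges (inv : List Int) (v : Int) : Int := ((inv.filter (fun x => decide (v ≤ x))).length : Int)

-- the common abstraction: sell level by level, freq at level curr is cges inv curr
def sellDown (inv : List Int) (curr order : Int) : Int :=
  if h : 0 < order ∧ 0 < curr then
    if cges inv curr ≤ order then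
      curr * cges inv curr + sellDown inv (curr - 1) (order - cges inv curr)
    else curr * order
  else 0
termination_by curr.toNat
decreasing_by omega

lemma cges_nonneg (inv : List Int) (v : Int) : 0 ≤ cges inv v := Int.natCast_nonneg _

lemma cges_succ (inv : List Int) (v : Int) :
    cges inv v = (inv.count v : Int) + cges inv (v + 1) := by
  unfold cges
  induction inv with
  | nil => simp
  | cons x t ih =>
    rcases lt_trichotomy x v with h | h | h
    · rw [List.filter_cons_of_neg (by simp; omega), List.filter_cons_of_neg (by simp; omega),
        List.count_cons_of_ne (by omega)]
      exact ih
    · subst h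
      rw [List.filter_cons_of_pos (by simp), List.filter_cons_of_neg (by simp),
        List.count_cons_self]
      simp only [List.length_cons]
      push_cast
      omega
    · rw [List.filter_cons_of_pos (by simp; omega), List.filter_cons_of_pos (by simp; omega),
        List.count_cons_of_ne (by omega)]
      simp only [List.length_cons]
      push_cast
      omega

lemma cges_eq_zero_of_max (inv : List Int) (M : Int) (hmax : ∀ x ∈ inv, x ≤ M) :
    cges inv (M + 1) = 0 := by
  unfold cges
  rw [List.filter_eq_nil_iff.mpr (fun x hx => by have := hmax x hx; simp; omega)]
  simp

lemma cges_eq_count_of_max (inv : List Int) (M : Int) (hmax : ∀ x ∈ inv, x ≤ M) :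
    cges inv M = (inv.count M : Int) := by
  have h0 : cges inv (M + 1) = 0 := cges_eq_zero_of_max inv M hmax
  have := cges_succ inv M
  omega

lemma pvALoop_eq (inv : List Int) (n : Nat) (curr : Int) (hn : curr.toNat = n)
    (cnt : PySem.Dict Int Int) (order profit : Int)
    (h1 : cnt.getD curr 0 = cges inv curr)
    (h2 : ∀ v : Int, v < curr → cnt.getD v 0 = (inv.count v : Int)) :
    pvALoop cnt curr order profit = profit + sellDown inv curr order := by
  induction n using Nat.strong_induction_on generalizing curr cnt order profit with
  | _ n ih =>
    rw [pvALoop, sellDown]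
    by_cases hc : 0 < order ∧ 0 < curr
    · rw [dif_pos hc, dif_pos hc]
      simp only [h1]
      by_cases hle : cges inv curr ≤ order
      · rw [if_pos hle, if_pos hle]
        have h1' : (cnt.modify (curr - 1) 0 (· + cnt.getD curr 0)).getD (curr - 1) 0
            = cges inv (curr - 1) := by
          rw [PySem.Dict.getD_modify_self, h2 (curr - 1) (by omega), h1]
          have := cges_succ inv (curr - 1)
          rw [show curr - 1 + 1 = curr by ring] at this
          omega
        have h2' : ∀ v : Int, v < curr - 1 →
            (cnt.modify (curr - 1) 0 (· + cnt.getD curr 0)).getD v 0 = (inv.count v : Int) := by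
          intro v hv
          rw [PySem.Dict.getD_modify, if_neg (by omega)]
          exact h2 v (by omega)
        rw [h1] at h1' h2'
        rw [ih (curr - 1).toNat (by omega) (curr - 1) rfl _ _ _ h1' h2']
        ring
      · rw [if_neg hle, if_neg hle]
    · rw [dif_neg hc, dif_neg hc]
      ring

lemma even_helper (a b : Int) : 2 ∣ (a + b) * (a - b - 1) := by
  rcases Int.even_or_odd (a + b) with ⟨c, hc⟩ | ⟨c, hc⟩
  · exact Dvd.dvd.mul_right ⟨c, by omega⟩ _
  · exact Dvd.dvd.mul_left ⟨c - b, by omega⟩ _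

lemma half_eq (x a y : Int) (hx : x = 2 * a + y) (hy : 2 ∣ y) : x / 2 = a + y / 2 := by
  obtain ⟨c, rfl⟩ := hy
  have hx' : x = 2 * (a + c) := by omega
  rw [hx', Int.mul_ediv_cancel_left _ (by norm_num), Int.mul_ediv_cancel_left _ (by norm_num)]

lemma sellDown_block (inv : List Int) (p lo : Int) (hp : 1 ≤ p) (hlo : 0 ≤ lo)
    (n : Nat) (hi : Int) (hn : (hi - lo).toNat = n) (hhl : lo < hi)
    (hg : ∀ v, lo < v → v ≤ hi → cges inv v = p)
    (order : Int) (horder : 0 ≤ order) :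
    sellDown inv hi order =
      if p * (hi - lo) ≤ order then
        p * (hi + lo + 1) * (hi - lo) / 2 + sellDown inv lo (order - p * (hi - lo))
      else
        p * (2 * hi - order / p + 1) * (order / p) / 2 + (order % p) * (hi - order / p) := by
  induction n using Nat.strong_induction_on generalizing hi order with
  | _ n ih =>
  have hblock : 0 < p * (hi - lo) := mul_pos (by omega) (by omega)
  have hphi : cges inv hi = p := hg hi hhl le_rfl
  rw [sellDown]
  rcases eq_or_lt_of_le horder with hord0 | hordpos
  · rw [dif_neg (by omega), if_neg (by omega), ← hord0]
    simp
  · rw [dif_pos ⟨hordpos, by omega⟩, hphi]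
    by_cases hle : p ≤ order
    · rw [if_pos hle]
      by_cases hbase : hi - 1 = lo
      · have e : hi = lo + 1 := by omega
        subst e
        rw [if_pos (by rw [show p * (lo + 1 - lo) = p by ring]; exact hle)]
        have hhalf : p * (lo + 1 + lo + 1) * (lo + 1 - lo) / 2 = (lo + 1) * p + 0 / 2 :=
          half_eq _ _ _ (by ring) ⟨0, by ring⟩
        rw [hhalf, show lo + 1 - 1 = lo by ring, show order - p * (lo + 1 - lo) = order - p by ring]
        ring_nf
      · have hrec := ih (hi - 1 - lo).toNat (by omega) (hi - 1) rfl (by omega)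
          (fun v hv1 hv2 => hg v hv1 (by omega)) (order - p) (by omega)
        rw [hrec]
        have hsplit : p * (hi - lo) = p * (hi - 1 - lo) + p := by ring
        by_cases hcase : p * (hi - 1 - lo) ≤ order - p
        · rw [if_pos hcase, if_pos (by linarith)]
          rw [show order - p - p * (hi - 1 - lo) = order - p * (hi - lo) by ring]
          have hdvd : 2 ∣ p * (hi - 1 + lo + 1) * (hi - 1 - lo) := by
            obtain ⟨c, hc⟩ := even_helper hi lo
            exact ⟨p * c, by linear_combination p * hc⟩
          have hhalf : p * (hi + lo + 1) * (hi - lo) / 2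
              = hi * p + p * (hi - 1 + lo + 1) * (hi - 1 - lo) / 2 :=
            half_eq _ _ _ (by ring) hdvd
          rw [hhalf]
          ring
        · rw [if_neg hcase, if_neg (by simp only [not_le] at hcase ⊢; linarith)]
          have hk : (order - p) / p = order / p - 1 := by
            rw [show order - p = order + -1 * p by ring,
              Int.add_mul_ediv_right _ _ (show p ≠ 0 by omega)]
            ring
          have hr : (order - p) % p = order % p := Int.sub_emod_right order p
          rw [hk, hr, show hi - 1 - (order / p - 1) = hi - order / p by ring]
          have hdvd : 2 ∣ p * (2 * (hi - 1) - (order / p - 1) + 1) * (order / p - 1) := by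
            obtain ⟨c, hc⟩ := even_helper hi (hi - order / p)
            exact ⟨p * c, by linear_combination p * hc⟩
          have hhalf : p * (2 * hi - order / p + 1) * (order / p) / 2
              = hi * p + p * (2 * (hi - 1) - (order / p - 1) + 1) * (order / p - 1) / 2 :=
            half_eq _ _ _ (by ring) hdvd
          rw [hhalf]
          ring
    · rw [if_neg hle]
      have hple : p ≤ p * (hi - lo) := le_mul_of_one_le_right (by omega) (by omega)
      have hk0 : order / p = 0 := Int.ediv_eq_zero_of_lt horder (by omega)
      have hr0 : order % p = order := Int.emod_eq_of_lt horder (by omega)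
      rw [if_neg (by simp only [not_le]; omega), hk0, hr0]
      simp only [mul_zero, Int.zero_ediv, zero_add, sub_zero]
      ring

lemma cges_congr (inv : List Int) (v hi : Int) (hv : v ≤ hi)
    (hnone : ∀ x ∈ inv, v ≤ x → x < hi → False) : cges inv v = cges inv hi := by
  unfold cges
  rw [List.filter_congr (fun x hx => decide_eq_decide.mpr
    ⟨fun h1 => not_lt.mp (fun h2 => hnone x hx h1 h2), fun h1 => le_trans hv h1⟩)]

lemma pvBLoop_eq (inv : List Int) (cnt : PySem.Dict Int Int)
    (hcnt : ∀ v : Int, 0 < v → cnt.getD v 0 = (inv.count v : Int)) :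
    ∀ (vals : List Int) (pile profit order : Int), 0 ≤ order →
      vals.Pairwise (fun a b => b < a) → (∀ v ∈ vals, 0 < v) →
      (match vals with
       | [] => True
       | hi :: _ => pile = cges inv (hi + 1) ∧ ∀ v, 0 < v → v ≤ hi → (v ∈ inv ↔ v ∈ vals)) →
      pvBLoop cnt vals pile profit order =
        profit + (match vals with | [] => 0 | hi :: _ => sellDown inv hi order) := by
  intro vals
  induction vals with
  | nil =>
    intro pile profit order _ _ _ _
    simp [pvBLoop]
  | cons hi rest ihrest =>
    intro pile profit order horder hpw hpos hinv
    obtain ⟨hpile, hmem⟩ := hinv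
    have hhipos : 0 < hi := hpos hi List.mem_cons_self
    have hhiinv : hi ∈ inv := (hmem hi hhipos le_rfl).mpr List.mem_cons_self
    have hrestlt : ∀ b ∈ rest, b < hi := (List.pairwise_cons.mp hpw).1
    have hcount : 0 < inv.count hi := List.count_pos_iff.mpr hhiinv
    have hcges0 : 0 ≤ cges inv (hi + 1) := cges_nonneg inv (hi + 1)
    have hsucc := cges_succ inv hi
    have hpile' : pile + cnt.getD hi 0 = cges inv hi := by
      rw [hcnt hi hhipos, hpile]
      omega
    have hp1 : 1 ≤ pile + cnt.getD hi 0 := by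
      rw [hcnt hi hhipos, hpile]
      omega
    cases rest with
    | nil =>
      have hnone : ∀ x ∈ inv, (0 : Int) < x → x < hi → False := by
        intro x hx h1 h2
        have := (hmem x h1 (le_of_lt h2)).mp hx
        simp at this
        omega
      have hg : ∀ v, (0 : Int) < v → v ≤ hi → cges inv v = pile + cnt.getD hi 0 := by
        intro v hv1 hv2
        rw [cges_congr inv v hi hv2 (fun x hx h1 h2 => hnone x hx (lt_of_lt_of_le hv1 h1) h2),
          hpile']
      rw [pvBLoop.eq_def]
      simp only []
      rw [sellDown_block inv (pile + cnt.getD hi 0) 0 hp1 le_rfl (hi - 0).toNat hi rfl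
        (by omega) (by simpa using hg) order horder]
      split_ifs with hcond
      · rw [pvBLoop.eq_def]
        simp only []
        rw [PySem.Int.floordiv_eq_ediv_of_pos (by norm_num)]
        rw [show sellDown inv 0 (order - (pile + cnt.getD hi 0) * (hi - 0)) = 0 by
          rw [sellDown]; rw [dif_neg (by omega)]]
        ring
      · rw [PySem.Int.floordiv_eq_ediv_of_pos (by norm_num),
          PySem.Int.floordiv_eq_ediv_of_pos (by omega),
          PySem.Int.mod_eq_emod_of_pos (by omega)]
        ring
    | cons l rest' =>
      have hlpos : 0 < l := hpos l (List.mem_cons_of_mem _ List.mem_cons_self)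
      have hlhi : l < hi := hrestlt l List.mem_cons_self
      have hrest'lt : ∀ b ∈ rest', b < l :=
        (List.pairwise_cons.mp (List.pairwise_cons.mp hpw).2).1
      have hnone : ∀ x ∈ inv, l < x → x < hi → False := by
        intro x hx h1 h2
        have hxmem := (hmem x (by omega) (le_of_lt h2)).mp hx
        simp only [List.mem_cons] at hxmem
        rcases hxmem with h | h | h
        · omega
        · omega
        · have := hrest'lt x h
          omega
      have hg : ∀ v, l < v → v ≤ hi → cges inv v = pile + cnt.getD hi 0 := by
        intro v hv1 hv2
        rw [cges_congr inv v hi hv2 (fun x hx h1 h2 => hnone x hx (lt_of_lt_of_le hv1 h1) h2),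
          hpile']
      rw [pvBLoop.eq_def]
      simp only []
      rw [sellDown_block inv (pile + cnt.getD hi 0) l hp1 (by omega) (hi - l).toNat hi rfl
        hlhi hg order horder]
      split_ifs with hcond
      · rw [ihrest (pile + cnt.getD hi 0) _ _ (by omega)
          (List.pairwise_cons.mp hpw).2
          (fun v hv => hpos v (List.mem_cons_of_mem _ hv))
          ⟨(hg (l + 1) (by omega) (by omega)).symm, ?_⟩]
        · rw [PySem.Int.floordiv_eq_ediv_of_pos (by norm_num)]
          ring
        · intro v hv1 hv2
          constructor
          · intro hvinv
            have := (hmem v hv1 (by omega)).mp hvinv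
            simp only [List.mem_cons] at this ⊢
            rcases this with h | h
            · omega
            · exact h
          · intro hvmem
            exact (hmem v hv1 (by omega)).mpr (List.mem_cons_of_mem _ hvmem)
      · rw [PySem.Int.floordiv_eq_ediv_of_pos (by norm_num),
          PySem.Int.floordiv_eq_ediv_of_pos (by omega),
          PySem.Int.mod_eq_emod_of_pos (by omega)]
        ring

-- ===== VERDICT (by name: the statement is the Claim_ definition above) =====
theorem supplierInventory_spec : Claim_equal_supplierInventory := by
  intro ns inv order _hdom hpre
  unfold Pre_supplierInventory at hpre
  unfold Spec_supplierInventory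
  -- the maximum M of inv
  obtain ⟨M, hM⟩ : ∃ M, PySem.List.max? (PySem.Dict.counter inv).keys (fun x : Int => x)
      = some M := by
    cases h : PySem.List.max? (PySem.Dict.counter inv).keys (fun x : Int => x) with
    | none =>
      exfalso
      have hkeys := (PySem.List.max?_eq_none_iff _ _).mp h
      rw [PySem.Dict.keys_counter] at hkeys
      cases inv with
      | nil => exact hpre rfl
      | cons a t =>
        have : a ∈ PySem.Set.ofList (a :: t) := (PySem.Set.mem_ofList _ _).mpr List.mem_cons_self
        simp [hkeys] at this
    | some m => exact ⟨m, rfl⟩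
  have hMmax : ∀ x ∈ inv, x ≤ M := by
    intro x hx
    exact PySem.List.max?_isMax hM x (by rw [PySem.Dict.keys_counter]; exact (PySem.Set.mem_ofList _ _).mpr hx)
  have hMmem : M ∈ inv := by
    have := PySem.List.max?_mem hM
    rw [PySem.Dict.keys_counter] at this
    exact (PySem.Set.mem_ofList _ _).mp this
  -- A's side: LHS = sellDown inv M order
  have hA : supplierInventory ns inv order = 0 + sellDown inv M order := by
    simp only [supplierInventory, hM]
    exact pvALoop_eq inv M.toNat M rfl _ order 0
      (by rw [PySem.Dict.getD_counter, cges_eq_count_of_max inv M hMmax])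
      (fun v _ => PySem.Dict.getD_counter ..)
  rw [hA]
  by_cases horder : order ≤ 0
  · simp only [supplierInventory_alt, if_pos horder]
    rw [sellDown, dif_neg (by omega)]
    ring
  · simp only [supplierInventory_alt, if_neg horder]
    by_cases hMpos : M ≤ 0
    · -- no positive values at all: filter is empty, B's loop is over []
      have hposnil : inv.filter (fun v => decide (0 < v)) = [] :=
        List.filter_eq_nil_iff.mpr (fun x hx => by have := hMmax x hx; simp; omega)
      rw [hposnil, sellDown, dif_neg (by omega)]
      have hkeys : (PySem.Dict.counter ([] : List Int)).keys = ([] : List Int) := by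
        rw [PySem.Dict.keys_counter]; rfl
      rw [hkeys]
      rw [show PySem.List.sorted ([] : List Int) (fun x : Int => x) true = []
        from (PySem.List.sorted_eq_nil_iff _ _ _).mpr rfl]
      simp [pvBLoop]
    · -- M > 0 : B's value list is nonempty with head M
      rw [not_le] at hMpos
      have hcnt : ∀ v : Int, 0 < v →
          (PySem.Dict.counter (inv.filter (fun v => decide (0 < v)))).getD v 0
            = (inv.count v : Int) := by
        intro v hv
        rw [PySem.Dict.getD_counter, List.count_filter (by simpa)]
      have hvmem : ∀ v : Int, v ∈ PySem.List.sorted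
          (PySem.Dict.counter (inv.filter (fun v => decide (0 < v)))).keys
          (fun x : Int => x) true ↔ (v ∈ inv ∧ 0 < v) := by
        intro v
        rw [PySem.List.mem_sorted, PySem.Dict.keys_counter, PySem.Set.mem_ofList,
          List.mem_filter]
        simp
      have hnodup : (PySem.List.sorted
          (PySem.Dict.counter (inv.filter (fun v => decide (0 < v)))).keys
          (fun x : Int => x) true).Nodup := by
        refine (PySem.List.sorted_perm ..).symm.nodup ?_
        rw [PySem.Dict.keys_counter]
        exact PySem.Set.nodup_ofList _
      have hpw : (PySem.List.sorted
          (PySem.Dict.counter (inv.filter (fun v => decide (0 < v)))).keys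
          (fun x : Int => x) true).Pairwise (fun a b => b < a) := by
        refine ((PySem.List.sorted_pairwise_rev ..).and hnodup).imp ?_
        rintro a b ⟨hle, hne⟩
        exact lt_of_le_of_ne hle (Ne.symm hne)
      have hMvals : M ∈ PySem.List.sorted
          (PySem.Dict.counter (inv.filter (fun v => decide (0 < v)))).keys
          (fun x : Int => x) true := (hvmem M).mpr ⟨hMmem, hMpos⟩
      cases hvv : PySem.List.sorted
          (PySem.Dict.counter (inv.filter (fun v => decide (0 < v)))).keys
          (fun x : Int => x) true with
      | nil => rw [hvv] at hMvals; simp at hMvals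
      | cons hi rest =>
        rw [hvv] at hvmem hpw hMvals
        have hhiM : hi = M := by
          have h1 : hi ≤ M := hMmax hi ((hvmem hi).mp List.mem_cons_self).1
          simp only [List.mem_cons] at hMvals
          rcases hMvals with h | h
          · omega
          · have := (List.pairwise_cons.mp hpw).1 M h
            omega
        subst hhiM
        have := pvBLoop_eq inv _ hcnt (hi :: rest) 0 0 order (by omega) hpw
          (fun v hv => ((hvmem v).mp hv).2)
          ⟨(cges_eq_zero_of_max inv hi hMmax).symm,
            fun v hv1 hv2 => ⟨fun hvi => (hvmem v).mpr ⟨hvi, hv1⟩,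
              fun hvv2 => ((hvmem v).mp hvv2).1⟩⟩
        rw [this]
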